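-- pv_equiv track=rewrite | github.com/alexromashchenko/romashchenko-geekbrains | fibonacci2.0.py | fibon
-- ===== SOURCE A (Python) =====
-- def fibon(n, m):
--     a = 1
--     b = 1
--     c = list()
--     d = list()
--     c.append(1)
--     c.append(1)
--     for i in range(0, m + 1):
--         a, b = b, a + b
--         c.append(b)
--         if i >= (n-3) and i <= (m-3):
--             d.append(b)
--     return d
-- ===== SOURCE B (Python) =====
-- def fibon(n, m):
--     # Build the full Fibonacci table fib(1)..fib(m) unconditionally, then slice.
--     stop = max(m, 0)
--     fibs = [1, 1]
--     for _ in range(stop):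
--         fibs.append(fibs[-1] + fibs[-2])
--     return fibs[max(n, 3) - 1 : stop]
-- ===== Notes on version B (the rewrite author's own statement) =====
-- stated objective: simpler
-- what changed: B builds the full Fibonacci table [fib(1)..] in one unconditional append loop (no index counter, no per-iteration window test, no dead list c) and returns a single slice fibs[max(n,3)-1 : max(m,0)], replacing A's filtered accumulation into d.
import Mathlib
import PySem

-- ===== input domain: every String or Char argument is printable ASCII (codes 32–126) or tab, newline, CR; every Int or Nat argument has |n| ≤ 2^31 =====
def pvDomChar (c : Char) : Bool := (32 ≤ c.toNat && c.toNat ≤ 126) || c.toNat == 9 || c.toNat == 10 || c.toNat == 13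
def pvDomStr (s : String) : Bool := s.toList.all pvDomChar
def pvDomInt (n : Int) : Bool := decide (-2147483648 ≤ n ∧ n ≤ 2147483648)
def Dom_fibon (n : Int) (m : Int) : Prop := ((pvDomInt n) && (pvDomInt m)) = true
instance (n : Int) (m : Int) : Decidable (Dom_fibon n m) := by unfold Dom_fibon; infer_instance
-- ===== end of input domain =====

-- B builds the full Fibonacci table in one unconditional loop and returns a single slice,
-- replacing A's per-iteration window test and dead list c; objective: simpler. Return value identical.

-- ===== PORT A =====
-- one loop iteration of A: a, b = b, a + b; c.append(b); if n-3 <= i <= m-3: d.append(b)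
def stepA (n : Int) (m : Int) (s : Int × Int × List Int × List Int) (i : Int) :
    Int × Int × List Int × List Int :=
  (s.2.1, s.1 + s.2.1, s.2.2.1 ++ [s.1 + s.2.1],
   if n - 3 ≤ i ∧ i ≤ m - 3 then s.2.2.2 ++ [s.1 + s.2.1] else s.2.2.2)

def fibon (n : Int) (m : Int) : List Int :=
  (((PySem.List.pyRange 0 (m + 1) 1).foldl (stepA n m) (1, 1, [1, 1], []))).2.2.2

-- ===== PORT B =====
-- one loop iteration of B: fibs.append(fibs[-1] + fibs[-2]); fibs always has ≥ 2
-- elements, so both negative indices are in range and pyGetD's default is never used.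
def stepB (fibs : List Int) (_ : Int) : List Int :=
  fibs ++ [PySem.List.pyGetD fibs (-1) 0 + PySem.List.pyGetD fibs (-2) 0]

def fibon_alt (n : Int) (m : Int) : List Int :=
  let stop : Int := max m 0
  let fibs := (PySem.List.pyRange 0 stop 1).foldl stepB [1, 1]
  PySem.List.slice fibs (some (max n 3 - 1)) (some stop)

-- ===== PRECONDITION & SPEC =====
def Spec_fibon (n : Int) (m : Int) (out : List Int) : Prop := out = fibon_alt n m
instance (n : Int) (m : Int) (out : List Int) : Decidable (Spec_fibon n m out) := by unfold Spec_fibon; infer_instance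

-- ===== CLAIM (what is proved, stated in full; the proofs are below) =====
def Claim_equal_fibon : Prop := ∀ (n : Int) (m : Int), Dom_fibon n m → Spec_fibon n m (fibon n m)

-- ===== LEMMAS AND PROOFS =====

-- fibG k = fib(k+1) in A's 1-based numbering: fibG 0 = fibG 1 = 1
def fibG : Nat → Int
  | 0 => 1
  | 1 => 1
  | (k+2) => fibG k + fibG (k+1)

-- A's loop: the pair (a, b) walks the fibG sequence, c collects every b, d the windowed ones
theorem foldA_char (n m : Int) : ∀ (k t : Nat) (c d : List Int),
    List.foldl (stepA n m) (fibG t, fibG (t+1), c, d)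
      ((List.range' t k).map (fun (u : Nat) => (u : Int)))
    = (fibG (t+k), fibG (t+k+1),
       c ++ (List.range' t k).map (fun u => fibG (u+2)),
       d ++ ((List.range' t k).filter
              (fun (u : Nat) => decide (n - 3 ≤ (u:Int) ∧ (u:Int) ≤ m - 3))).map (fun u => fibG (u+2))) := by
  intro k
  induction k with
  | zero => intro t c d; simp
  | succ k ih =>
    intro t c d
    rw [List.range'_succ, List.map_cons, List.foldl_cons]
    have hs : stepA n m (fibG t, fibG (t+1), c, d) (t : Int)
        = (fibG (t+1), fibG (t+1+1), c ++ [fibG (t+2)],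
           if n - 3 ≤ (t:Int) ∧ (t:Int) ≤ m - 3 then d ++ [fibG (t+2)] else d) := by
      simp only [stepA]
      rw [show fibG t + fibG (t+1) = fibG (t+2) from rfl]
    rw [hs]
    by_cases h : n - 3 ≤ (t:Int) ∧ (t:Int) ≤ m - 3
    · rw [if_pos h, ih (t+1), List.filter_cons_of_pos (by simpa using h)]
      simp [show t+1+k = t+(k+1) from by omega]
    · rw [if_neg h, ih (t+1), List.filter_cons_of_neg (by simpa using h)]
      simp [show t+1+k = t+(k+1) from by omega]

-- B's loop: appending fibs[-1] + fibs[-2] extends the fibG table by one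
theorem stepB_eq (j : Nat) (x : Int) :
    stepB (List.map fibG (List.range (j+2))) x = List.map fibG (List.range (j+3)) := by
  rw [stepB, PySem.List.pyGetD_neg_ofNat _ 1 0 (by simp) (by simp),
      PySem.List.pyGetD_neg_ofNat _ 2 0 (by simp) (by simp)]
  simp [List.range_succ, fibG]
  omega

theorem foldB_char : ∀ (xs : List Int) (j : Nat),
    List.foldl stepB (List.map fibG (List.range (j+2))) xs
    = List.map fibG (List.range (j + 2 + xs.length)) := by
  intro xs
  induction xs with
  | nil => intro j; simp
  | cons x xs ih =>
    intro j
    rw [List.foldl_cons, stepB_eq j x, show j+3 = (j+1)+2 from by omega, ih (j+1)]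
    congr 2
    simp; omega

-- filter of an initial segment by an Int interval is a contiguous range'
theorem filter_range_interval (lo hi : Int) : ∀ (N : Nat),
    (List.range N).filter (fun (u : Nat) => decide (lo ≤ (u:Int) ∧ (u:Int) ≤ hi))
    = List.range' (max lo 0).toNat ((min hi ((N:Int) - 1) - max lo 0 + 1).toNat) := by
  intro N
  induction N with
  | zero =>
    have h0 : (min hi (((0:Nat):Int) - 1) - max lo 0 + 1).toNat = 0 := by push_cast; omega
    rw [h0]; simp
  | succ N ih =>
    rw [List.range_succ, List.filter_append, ih]
    by_cases h : lo ≤ (N:Int) ∧ (N:Int) ≤ hi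
    · have h1 : (min hi (((N:Nat)+1:Int) - 1) - max lo 0 + 1).toNat
          = (min hi ((N:Int) - 1) - max lo 0 + 1).toNat + 1 := by omega
      have h2 : (max lo 0).toNat + (min hi ((N:Int) - 1) - max lo 0 + 1).toNat = N := by omega
      push_cast [h1]
      rw [List.range'_concat]
      simp [h, h2]
    · have h1 : (min hi (((N:Nat)+1:Int) - 1) - max lo 0 + 1).toNat
          = (min hi ((N:Int) - 1) - max lo 0 + 1).toNat := by omega
      push_cast [h1]
      simp [h]

-- ===== VERDICT (by name: the statement is the Claim_ definition above) =====
theorem fibon_spec : Claim_equal_fibon := by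
  intro n m _
  show fibon n m = fibon_alt n m
  -- characterize A's result
  have hA : fibon n m = List.map (fun u => fibG (u+2))
      ((List.range (m+1).toNat).filter
        (fun (u : Nat) => decide (n - 3 ≤ (u:Int) ∧ (u:Int) ≤ m - 3))) := by
    unfold fibon
    rw [PySem.List.pyRange_one]
    have e0 : ((1:Int), (1:Int), ([1,1] : List Int), ([] : List Int))
        = (fibG 0, fibG (0+1), ([1,1] : List Int), ([] : List Int)) := rfl
    simp only [zero_add, sub_zero]
    rw [e0, List.range_eq_range', foldA_char n m ((m+1).toNat) 0 [1,1] []]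
    simp [← List.range_eq_range']
  -- characterize B's result
  have hB : fibon_alt n m = PySem.List.slice
      (List.map fibG (List.range (0 + 2 + (max m 0).toNat)))
      (some (max n 3 - 1)) (some (max m 0)) := by
    show PySem.List.slice ((PySem.List.pyRange 0 (max m 0) 1).foldl stepB [1,1])
        (some (max n 3 - 1)) (some (max m 0)) = _
    have e2 : ([1,1] : List Int) = List.map fibG (List.range (0+2)) := rfl
    rw [e2, foldB_char, PySem.List.length_pyRange_one]
    simp
  rw [hA, hB, filter_range_interval]
  -- arithmetic glue
  set K := max n 3 with hK
  have hK3 : 3 ≤ K := le_max_right _ _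
  have hLK : max (n-3) 0 = K - 3 := by
    rcases le_total n 3 with h|h
    · rw [hK, max_eq_right h, max_eq_right (by omega : n - 3 ≤ 0)]; norm_num
    · rw [hK, max_eq_left h, max_eq_left (by omega : (0:Int) ≤ n - 3)]
  have hMv : ((max m 0) : Int) = ((m.toNat : Nat) : Int) := by
    rcases le_total m 0 with h|h
    · rw [max_eq_right h]; omega
    · rw [max_eq_left h]; omega
  have hMn : (max m 0).toNat = m.toNat := by omega
  have hmin : min (m-3) ((((m+1).toNat : Nat) : Int) - 1) = m - 3 := by omega
  rw [hLK, hmin, hMn, hMv,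
      PySem.List.slice_toNat _ (show (0:Int) ≤ K - 1 by omega)
        (show (0:Int) ≤ ((m.toNat : Nat) : Int) from by omega)]
  simp only [Int.toNat_natCast]
  rw [← List.map_drop, ← List.map_take]
  simp only [List.range_eq_range', List.drop_range', mul_one, zero_add]
  rw [List.take_range'_of_length_ge (show m.toNat - (K - 1).toNat ≤ 2 + m.toNat - (K - 1).toNat from by omega)]
  rw [show (fun (u : Nat) => fibG (u+2)) = fibG ∘ (2 + ·) from by funext u; simp [Nat.add_comm],
      ← List.map_map, List.map_add_range']
  congr 1
  congr 1 <;> omega
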